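-- pv_equiv track=rewrite | github.com/glennfeys/Discrete-algorithms | project_4/tibo_glenn/ksubset-rev-door.py | kSubsetRevDoorUnrank
-- ===== SOURCE A (Python) =====
-- import math
--
-- def kSubsetRevDoorUnrank(n, k, r):
--     x = n
--     T = []
--     for i in range(k, 0, -1):
--         while math.comb(x,i) > r:
--             x -= 1
--         T = [x+1] + T
--         r = math.comb(x+1, i) - r -1
--     return T
-- ===== SOURCE B (Python) =====
-- import math
--
-- def kSubsetRevDoorUnrank(n, k, r):
--     out = []
--     hi = n
--     for i in range(k, 0, -1):
--         lo = i - 1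
--         while lo < hi:
--             mid = (lo + hi + 1) // 2
--             if math.comb(mid, i) <= r:
--                 lo = mid
--             else:
--                 hi = mid - 1
--         out.append(lo + 1)
--         r = math.comb(lo + 1, i) - r - 1
--         hi = lo
--     out.reverse()
--     return out
-- ===== Notes on version B (the rewrite author's own statement) =====
-- stated objective: faster
-- what changed: Each stage's pivot x (largest x with comb(x,i) <= r) is found by binary search over [i-1, x] instead of A's linear downward scan, and the result list is built by append + final reverse instead of repeated prepending.
import Mathlib
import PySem

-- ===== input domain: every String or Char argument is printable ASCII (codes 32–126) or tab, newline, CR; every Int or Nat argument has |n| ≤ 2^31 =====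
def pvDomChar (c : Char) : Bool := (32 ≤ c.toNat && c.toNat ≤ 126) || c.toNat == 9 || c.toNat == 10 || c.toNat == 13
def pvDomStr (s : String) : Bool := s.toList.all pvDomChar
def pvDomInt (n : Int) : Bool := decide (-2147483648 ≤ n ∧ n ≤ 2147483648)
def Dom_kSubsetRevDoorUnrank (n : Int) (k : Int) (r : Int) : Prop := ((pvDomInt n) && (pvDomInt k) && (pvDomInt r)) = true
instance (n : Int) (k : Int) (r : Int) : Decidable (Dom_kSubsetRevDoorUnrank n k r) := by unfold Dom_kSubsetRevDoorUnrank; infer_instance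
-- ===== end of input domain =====

-- B replaces A's linear downward scan for the pivot x (while comb(x,i) > r: x -= 1) by a
-- binary search for the largest x with comb(x,i) ≤ r, and builds the result by append+reverse
-- instead of repeated prepending; objective: faster.

-- ===== PORT A =====

-- math.comb x i; exact for 0 ≤ x, 0 ≤ i (Python raises ValueError on negative arguments;
-- Pre_ keeps every comb call inside that range)
def pvComb (x i : Int) : Int := (Nat.choose x.toNat i.toNat : Int)

-- 'while math.comb(x,i) > r: x -= 1'; the fuel only makes the loop total: on every input
-- admitted by Pre_ the loop stops before the fuel runs out (proved below)
def pvWhileA (fuel : Nat) (x i r : Int) : Int :=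
  match fuel with
  | 0 => x
  | f + 1 => if pvComb x i > r then pvWhileA f (x - 1) i r else x

-- one iteration of A's for-loop on state (x, T, r)
def pvStepA (st : Int × List Int × Int) (i : Int) : Int × List Int × Int :=
  let x := pvWhileA (st.1 + 2).toNat st.1 i st.2.2
  (x, (x + 1) :: st.2.1, pvComb (x + 1) i - st.2.2 - 1)

def kSubsetRevDoorUnrank (n : Int) (k : Int) (r : Int) : List Int :=
  ((PySem.List.pyRange k 0 (-1)).foldl pvStepA (n, ([] : List Int), r)).2.1

-- ===== PORT B =====

-- midpoint bound used by pvBsearch's termination proof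
theorem pvMid_bounds {lo hi : Int} (h : lo < hi) :
    lo + 1 ≤ PySem.Int.floordiv (lo + hi + 1) 2 ∧ PySem.Int.floordiv (lo + hi + 1) 2 ≤ hi := by
  rw [PySem.Int.floordiv_eq_ediv_of_pos (by omega : (0:Int) < 2)]
  omega

-- B's 'while lo < hi: mid = (lo+hi+1)//2; if comb(mid,i) <= r: lo = mid else: hi = mid - 1'
def pvBsearch (lo hi i r : Int) : Int :=
  if h : lo < hi then
    if pvComb (PySem.Int.floordiv (lo + hi + 1) 2) i ≤ r then
      pvBsearch (PySem.Int.floordiv (lo + hi + 1) 2) hi i r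
    else
      pvBsearch lo (PySem.Int.floordiv (lo + hi + 1) 2 - 1) i r
  else lo
termination_by (hi - lo).toNat
decreasing_by
  · have := pvMid_bounds h; omega
  · have := pvMid_bounds h; omega

-- one iteration of B's for-loop on state (hi, out, r); out is appended to and reversed at the end
def pvStepB (st : Int × List Int × Int) (i : Int) : Int × List Int × Int :=
  let x := pvBsearch (i - 1) st.1 i st.2.2
  (x, st.2.1 ++ [x + 1], pvComb (x + 1) i - st.2.2 - 1)

def kSubsetRevDoorUnrank_alt (n : Int) (k : Int) (r : Int) : List Int :=
  ((PySem.List.pyRange k 0 (-1)).foldl pvStepB (n, ([] : List Int), r)).2.1.reverse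

-- ===== PRECONDITION & SPEC =====
-- Exactly the inputs on which Python A returns normally: for k ≤ 0 the loop body never runs;
-- for k ≥ 1 A terminates iff n ≥ k-1, r ≥ 0 and (k = 1 or r < comb(n+1,k)) — outside this,
-- some comb call receives a negative first argument and Python raises ValueError.
def Pre_kSubsetRevDoorUnrank (n : Int) (k : Int) (r : Int) : Prop :=
  k ≤ 0 ∨ (1 ≤ k ∧ k - 1 ≤ n ∧ 0 ≤ r ∧ (k = 1 ∨ r < pvComb (n + 1) k))
instance (n : Int) (k : Int) (r : Int) : Decidable (Pre_kSubsetRevDoorUnrank n k r) := by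
  unfold Pre_kSubsetRevDoorUnrank; infer_instance

def pvWitness_kSubsetRevDoorUnrank : Int × Int × Int := (5, 2, 3)

def Spec_kSubsetRevDoorUnrank (n : Int) (k : Int) (r : Int) (out : List Int) : Prop := out = kSubsetRevDoorUnrank_alt n k r
instance (n : Int) (k : Int) (r : Int) (out : List Int) : Decidable (Spec_kSubsetRevDoorUnrank n k r out) := by unfold Spec_kSubsetRevDoorUnrank; infer_instance

-- ===== CLAIM (what is proved, stated in full; the proofs are below) =====
def Claim_equal_kSubsetRevDoorUnrank : Prop := ∀ (n : Int) (k : Int) (r : Int), Dom_kSubsetRevDoorUnrank n k r → Pre_kSubsetRevDoorUnrank n k r → Spec_kSubsetRevDoorUnrank n k r (kSubsetRevDoorUnrank n k r)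

-- ===== LEMMAS AND PROOFS =====

theorem pvComb_mono {x y : Int} (i : Int) (h : x ≤ y) : pvComb x i ≤ pvComb y i := by
  unfold pvComb
  exact_mod_cast Nat.choose_le_choose i.toNat (by omega : x.toNat ≤ y.toNat)

theorem pvComb_pred_self {i : Int} (h : 1 ≤ i) : pvComb (i - 1) i = 0 := by
  unfold pvComb
  rw [Nat.choose_eq_zero_of_lt (by omega)]
  rfl

-- A's while loop returns the largest z ≤ x with comb(z,i) ≤ r (given r ≥ 0 and i-1 ≤ x)
theorem pvWhileA_spec {i r : Int} (hi1 : 1 ≤ i) (hr : 0 ≤ r) :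
    ∀ (fuel : Nat) (x : Int), i - 1 ≤ x → (x - (i - 1)).toNat < fuel →
      i - 1 ≤ pvWhileA fuel x i r ∧ pvWhileA fuel x i r ≤ x ∧
      pvComb (pvWhileA fuel x i r) i ≤ r ∧
      (∀ y, pvWhileA fuel x i r < y → y ≤ x → r < pvComb y i) := by
  intro fuel
  induction fuel with
  | zero => intro x _ hf; omega
  | succ f ih =>
    intro x hx hf
    rw [pvWhileA]
    by_cases hc : pvComb x i > r
    · have hne : x ≠ i - 1 := by
        intro he; rw [he, pvComb_pred_self hi1] at hc; omega
      have hx' : i - 1 ≤ x - 1 := by omega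
      have hf' : (x - 1 - (i - 1)).toNat < f := by omega
      obtain ⟨h1, h2, h3, h4⟩ := ih (x - 1) hx' hf'
      simp only [if_pos hc]
      refine ⟨h1, by omega, h3, ?_⟩
      intro y hy1 hy2
      rcases lt_or_eq_of_le hy2 with hlt | heq
      · exact h4 y hy1 (by omega)
      · rwa [heq]
    · simp only [if_neg hc]
      exact ⟨hx, le_refl x, by omega, fun y h1 h2 => by omega⟩

-- B's binary search returns the largest z in [lo,hi] with comb(z,i) ≤ r (given comb(lo,i) ≤ r)
theorem pvBsearch_spec {i r : Int} :
    ∀ (g : Nat) (lo hi : Int), (hi - lo).toNat ≤ g → lo ≤ hi → pvComb lo i ≤ r →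
      lo ≤ pvBsearch lo hi i r ∧ pvBsearch lo hi i r ≤ hi ∧
      pvComb (pvBsearch lo hi i r) i ≤ r ∧
      (∀ y, pvBsearch lo hi i r < y → y ≤ hi → r < pvComb y i) := by
  intro g
  induction g with
  | zero =>
    intro lo hi hg hle hlo
    have : lo = hi := by omega
    rw [pvBsearch, dif_neg (by omega : ¬ lo < hi)]
    exact ⟨le_refl lo, hle, hlo, fun y h1 h2 => by omega⟩
  | succ g ih =>
    intro lo hi hg hle hlo
    rw [pvBsearch]
    by_cases h : lo < hi
    · have hm := pvMid_bounds h
      set mid := PySem.Int.floordiv (lo + hi + 1) 2 with hmid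
      rw [dif_pos h]
      by_cases hc : pvComb mid i ≤ r
      · rw [if_pos hc]
        obtain ⟨h1, h2, h3, h4⟩ := ih mid hi (by omega) (by omega) hc
        exact ⟨by omega, h2, h3, h4⟩
      · rw [if_neg hc]
        obtain ⟨h1, h2, h3, h4⟩ := ih lo (mid - 1) (by omega) (by omega) hlo
        refine ⟨h1, by omega, h3, ?_⟩
        intro y hy1 hy2
        by_cases hy : y ≤ mid - 1
        · exact h4 y hy1 hy
        · calc r < pvComb mid i := by omega
            _ ≤ pvComb y i := pvComb_mono i (by omega)
    · rw [dif_neg h]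
      exact ⟨le_refl lo, hle, hlo, fun y h1 h2 => by omega⟩

-- per stage the two searches agree
theorem pvSearch_eq {x i r : Int} (hi1 : 1 ≤ i) (hr : 0 ≤ r) (hx : i - 1 ≤ x) :
    pvWhileA (x + 2).toNat x i r = pvBsearch (i - 1) x i r := by
  obtain ⟨a1, a2, a3, a4⟩ := pvWhileA_spec hi1 hr (x + 2).toNat x hx (by omega)
  obtain ⟨b1, b2, b3, b4⟩ :=
    pvBsearch_spec (i := i) (r := r) (x - (i - 1)).toNat (i - 1) x (by omega) hx
      (by rw [pvComb_pred_self hi1]; exact hr)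
  rcases lt_trichotomy (pvWhileA (x + 2).toNat x i r) (pvBsearch (i - 1) x i r) with h | h | h
  · have := a4 _ h b2; omega
  · exact h
  · have := b4 _ h a2; omega

-- Pascal's rule at the Int level (0 ≤ z, 0 ≤ m)
theorem pvComb_pascal {z : Int} (m : Nat) (hz : 0 ≤ z) :
    pvComb (z + 1) ((m : Int) + 1) = pvComb z (m : Int) + pvComb z ((m : Int) + 1) := by
  unfold pvComb
  have h1 : (z + 1).toNat = z.toNat + 1 := by omega
  have h2 : ((m : Int) + 1).toNat = m + 1 := by omega
  have h3 : ((m : Int)).toNat = m := by omega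
  rw [h1, h2, h3, Nat.choose_succ_succ]
  push_cast
  ring

-- main loop invariant: from equal states, A's fold and B's fold (reversed) agree
theorem pvStages_eq :
    ∀ (m : Nat) (x r : Int) (TA TB : List Int),
      0 ≤ r → (m : Int) - 1 ≤ x → (2 ≤ m → r < pvComb (x + 1) (m : Int)) → TA = TB.reverse →
      ((PySem.List.pyRange (m : Int) 0 (-1)).foldl pvStepA (x, TA, r)).2.1
        = ((PySem.List.pyRange (m : Int) 0 (-1)).foldl pvStepB (x, TB, r)).2.1.reverse := by
  intro m
  induction m with
  | zero =>
    intro x r TA TB _ _ _ hT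
    rw [PySem.List.pyRange_neg_one_eq_nil (by omega)]
    simpa using hT
  | succ m ih =>
    intro x r TA TB hr hx hinv hT
    have hcons : PySem.List.pyRange ((m : Int) + 1) 0 (-1)
        = ((m : Int) + 1) :: PySem.List.pyRange (m : Int) 0 (-1) := by
      have := PySem.List.pyRange_neg_one_cons (a := (m : Int) + 1) (b := 0) (by omega)
      simpa using this
    have hi1 : (1 : Int) ≤ (m : Int) + 1 := by omega
    have hxm : ((m : Int) + 1) - 1 ≤ x := by omega
    push_cast [hcons, List.foldl_cons]
    -- the two steps produce the same pivot z
    have hz := pvSearch_eq (x := x) (i := (m : Int) + 1) hi1 hr hxm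
    simp only [pvStepA, pvStepB]
    set z := pvWhileA (x + 2).toNat x ((m : Int) + 1) r with hzdef
    rw [← hz]
    obtain ⟨a1, a2, a3, a4⟩ := pvWhileA_spec hi1 hr (x + 2).toNat x hxm (by omega)
    rw [← hzdef] at a1 a2 a3 a4
    push_cast at hinv
    rcases Nat.eq_zero_or_pos m with hm0 | hmpos
    · -- last stage: the remaining range is empty
      subst hm0
      rw [PySem.List.pyRange_neg_one_eq_nil (by norm_num)]
      simp [hT]
    · -- r stays a valid rank for the next stage
      have hrz : r < pvComb (z + 1) ((m : Int) + 1) := by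
        rcases lt_or_eq_of_le a2 with hlt | heq
        · exact a4 (z + 1) (by omega) (by omega)
        · rcases Nat.lt_or_ge m 1 with h1 | h1
          · omega
          · rw [heq]; exact hinv (by omega) 
      have hz0 : 0 ≤ z := by omega
      have hpascal := pvComb_pascal (z := z) m hz0
      have hmono := pvComb_mono (x := z) (y := z + 1) ((m : Int)) (by omega)
      refine ih z (pvComb (z + 1) ((m : Int) + 1) - r - 1) _ _ ?_ (by omega) ?_ ?_
      · omega
      · intro hm2
        -- r' ≤ comb(z,m) - 1 < comb(z+1,m) using Pascal and comb(z,m+1) ≤ r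
        omega
      · simp [hT]

-- ===== VERDICT (by name: the statement is the Claim_ definition above) =====
theorem kSubsetRevDoorUnrank_spec : Claim_equal_kSubsetRevDoorUnrank := by
  intro n k r _ hpre
  unfold Spec_kSubsetRevDoorUnrank kSubsetRevDoorUnrank kSubsetRevDoorUnrank_alt
  rcases hpre with hk | ⟨hk1, hkn, hr, hrb⟩
  · rw [PySem.List.pyRange_neg_one_eq_nil (by omega)]
    rfl
  · have hkeq : ((k.toNat : Int)) = k := Int.toNat_of_nonneg (by omega)
    rw [← hkeq]
    apply pvStages_eq k.toNat n r [] [] hr (by omega) ?_ rfl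
    intro h2
    rcases hrb with h1 | hlt
    · omega
    · rwa [hkeq]
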